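-- pv_equiv track=rewrite | github.com/skarwa4491/Python-DSA | Level Up/arrays and strings/practis_arrays_and_strings/palindrome2.py | solution
-- ===== SOURCE A (Python) =====
-- def solution(s):
--     '''
--         you are given a string , return if string can
--         be made palindrome if we can replace 1 char at max
--     '''
--
--     def is_palindrome(s, lo, hi):
--         i = lo
--         j = hi
--         while i < j:
--             if s[i] == s[j]:
--                 i += 1
--                 j -= 1
--                 continue
--             else:
--                 return False
--         return True
--
--     if len(s) == 1:
--         return True
--     if len(s) == 2:
--         return True
--     i = 0
--     j = len(s)-1
--     while i < j:
--         if s[i] == s[j]: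
--             i += 1
--             j -= 1
--         else:
--             return is_palindrome(s, i+1, j) or is_palindrome(s, i, j-1)
--     return True
-- ===== SOURCE B (Python) =====
-- def solution(s):
--     if s == s[::-1]:
--         return True
--     for k in range(len(s)):
--         t = s[:k] + s[k + 1:]
--         if t == t[::-1]:
--             return True
--     return False
-- ===== Notes on version B (the rewrite author's own statement) =====
-- stated objective: alternative
-- what changed: B drops the greedy two-pointer scan entirely: it returns whether s itself is a palindrome or some single-character deletion s[:k]+s[k+1:] is, which is provably the same predicate A's first-mismatch greedy decides.
import Mathlib
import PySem

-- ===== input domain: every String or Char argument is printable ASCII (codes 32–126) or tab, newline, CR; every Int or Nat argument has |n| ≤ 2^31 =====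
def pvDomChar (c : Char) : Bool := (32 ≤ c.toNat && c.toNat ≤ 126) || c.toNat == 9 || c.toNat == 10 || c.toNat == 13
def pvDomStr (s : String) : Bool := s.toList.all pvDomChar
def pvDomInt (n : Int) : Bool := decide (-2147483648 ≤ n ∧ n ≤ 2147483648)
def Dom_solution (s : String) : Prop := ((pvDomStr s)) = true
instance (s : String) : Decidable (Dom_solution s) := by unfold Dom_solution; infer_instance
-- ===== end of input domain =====

-- B replaces A's greedy first-mismatch two-pointer analysis by the exhaustive check
-- "s is a palindrome, or deleting some one character of s gives a palindrome" (objective: alternative).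

-- ===== PORT A =====
-- inner helper is_palindrome(s, lo, hi); every s[i]/s[j] A evaluates has its index in range,
-- where pyGetD is exact
def pvIsPal (l : List Char) (i j : Int) : Bool :=
  if h : i < j then
    if PySem.List.pyGetD l i ' ' == PySem.List.pyGetD l j ' ' then
      pvIsPal l (i + 1) (j - 1)
    else false
  else true
termination_by (j - i).toNat
decreasing_by omega

def pvSolLoop (l : List Char) (i j : Int) : Bool :=
  if h : i < j then
    if PySem.List.pyGetD l i ' ' == PySem.List.pyGetD l j ' ' then
      pvSolLoop l (i + 1) (j - 1)
    else pvIsPal l (i + 1) j || pvIsPal l i (j - 1)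
  else true
termination_by (j - i).toNat
decreasing_by omega

def solution (s : String) : Bool :=
  if s.toList.length == 1 then true
  else if s.toList.length == 2 then true
  else pvSolLoop s.toList 0 ((s.toList.length : Int) - 1)

-- ===== PORT B =====
-- s == s[::-1] is l == l.reverse; s[:k] + s[k+1:] is slice l none (some k) ++ slice l (some (k+1)) none;
-- the for-loop over range(len(s)) with early return True is List.any over pyRange
def solution_alt (s : String) : Bool :=
  let l := s.toList
  if l == l.reverse then true
  else
    (PySem.List.pyRange 0 (l.length : Int) 1).any (fun k =>
      let t := PySem.List.slice l none (some k) ++ PySem.List.slice l (some (k + 1)) none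
      t == t.reverse)

-- ===== PRECONDITION & SPEC =====
def Spec_solution (s : String) (out : Bool) : Prop := out = solution_alt s
instance (s : String) (out : Bool) : Decidable (Spec_solution s out) := by unfold Spec_solution; infer_instance

-- ===== CLAIM (what is proved, stated in full; the proofs are below) =====
def Claim_equal_solution : Prop := ∀ (s : String), Dom_solution s → Spec_solution s (solution s)

-- ===== LEMMAS AND PROOFS =====

-- "l is a palindrome, or deleting one character of l gives a palindrome": the predicate BOTH
-- programs decide (B directly; A by the greedy first-mismatch analysis)
def pvD1 (l : List Char) : Prop :=
  l.reverse = l ∨ ∃ k < l.length, (l.eraseIdx k).reverse = l.eraseIdx k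

-- a length-≤-1 list is its own reverse
lemma pal_short (t : List Char) (h : t.length ≤ 1) : (t == t.reverse) = true := by
  match t, h with
  | [], _ => simp
  | [a], _ => simp

-- peeling the two end characters off a reverse-and-compare check (Bool form)
lemma pal_cons_append (a b : Char) (m : List Char) :
    ((a :: (m ++ [b])) == (a :: (m ++ [b])).reverse) = ((a == b) && (m == m.reverse)) := by
  by_cases h1 : a = b
  · subst h1; simp
  · have hab : (a == b) = false := by simp [h1]
    simp [hab]

-- peeling the two end characters off a palindrome equation (Prop form)
lemma pal_ends (a b : Char) (m : List Char) :
    ((a :: (m ++ [b])).reverse = a :: (m ++ [b])) ↔ (b = a ∧ m.reverse = m) := by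
  rw [List.reverse_cons, List.reverse_append, List.reverse_singleton, List.singleton_append]
  constructor
  · intro h
    injection h with h1 h2
    subst h1
    exact ⟨rfl, List.append_cancel_right h2⟩
  · rintro ⟨rfl, h⟩
    rw [h]
    simp

-- a nonempty palindrome ending in a starts with a, around a smaller palindrome
lemma pal_snoc_ne_nil (a : Char) (m : List Char) (hm : m ≠ [])
    (h : (m ++ [a]).reverse = m ++ [a]) : ∃ w, m = a :: w ∧ w.reverse = w := by
  obtain ⟨c, w, rfl⟩ : ∃ c w, m = c :: w := by
    cases m with
    | nil => exact absurd rfl hm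
    | cons c w => exact ⟨c, w, rfl⟩
  rw [List.cons_append, pal_ends c a w] at h
  exact ⟨w, by rw [h.1], h.2⟩

-- a nonempty palindrome starting with a ends in a, around a smaller palindrome
lemma pal_cons_ne_nil (a : Char) (m : List Char) (hm : m ≠ [])
    (h : (a :: m).reverse = a :: m) : ∃ w, m = w ++ [a] ∧ w.reverse = w := by
  obtain ⟨w, c, rfl⟩ : ∃ w c, m = w ++ [c] := by
    rcases List.eq_nil_or_concat m with h0 | ⟨w, c, h0⟩
    · exact absurd h0 hm
    · exact ⟨w, c, by simpa using h0⟩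
  rw [pal_ends a c w] at h
  exact ⟨w, by rw [h.1], h.2⟩

-- the equal-ends peel of pvD1
lemma pvD1_peel_eq (a : Char) (m : List Char) : pvD1 (a :: (m ++ [a])) ↔ pvD1 m := by
  constructor
  · rintro (hpal | ⟨k, hk, hke⟩)
    · exact Or.inl (pal_ends a a m |>.mp hpal).2
    · match k, hk with
      | 0, _ =>
        simp only [List.eraseIdx_cons_zero] at hke
        rcases eq_or_ne m [] with rfl | hm
        · exact Or.inl rfl
        · obtain ⟨w, rfl, hw⟩ := pal_snoc_ne_nil a m hm hke
          exact Or.inr ⟨0, by simp, by simpa using hw⟩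
      | j + 1, hk =>
        rw [List.eraseIdx_cons_succ] at hke
        rcases Nat.lt_or_ge j m.length with hjl | hjg
        · rw [List.eraseIdx_append_of_lt_length hjl] at hke
          exact Or.inr ⟨j, hjl, (pal_ends a a _ |>.mp hke).2⟩
        · have hje : j = m.length := by simp at hk; omega
          subst hje
          rw [List.eraseIdx_append_of_length_le le_rfl] at hke
          simp only [Nat.sub_self, List.eraseIdx_cons_zero, List.append_nil] at hke
          rcases eq_or_ne m [] with rfl | hm
          · exact Or.inl rfl
          · obtain ⟨w, rfl, hw⟩ := pal_cons_ne_nil a m hm hke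
            refine Or.inr ⟨w.length, by simp, ?_⟩
            rw [show w.length = (w ++ [a]).length - 1 by simp,
                List.eraseIdx_append_of_length_le (by simp)]
            simpa using hw
  · rintro (hpal | ⟨k, hk, hke⟩)
    · exact Or.inl ((pal_ends a a m).mpr ⟨rfl, hpal⟩)
    · refine Or.inr ⟨k + 1, by simp; omega, ?_⟩
      rw [List.eraseIdx_cons_succ, List.eraseIdx_append_of_lt_length hk]
      exact (pal_ends a a _).mpr ⟨rfl, hke⟩

-- the distinct-ends peel of pvD1: only deleting one of the two mismatched ends can help
lemma pvD1_peel_ne (a b : Char) (m : List Char) (hab : a ≠ b) :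
    pvD1 (a :: (m ++ [b])) ↔ ((m ++ [b]).reverse = m ++ [b] ∨ (a :: m).reverse = a :: m) := by
  constructor
  · rintro (hpal | ⟨k, hk, hke⟩)
    · exact absurd (pal_ends a b m |>.mp hpal).1 (Ne.symm hab)
    · match k, hk with
      | 0, _ =>
        simp only [List.eraseIdx_cons_zero] at hke
        exact Or.inl hke
      | j + 1, hk =>
        rw [List.eraseIdx_cons_succ] at hke
        rcases Nat.lt_or_ge j m.length with hjl | hjg
        · rw [List.eraseIdx_append_of_lt_length hjl] at hke
          exact absurd (pal_ends a b _ |>.mp hke).1 (Ne.symm hab)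
        · rw [List.eraseIdx_append_of_length_le hjg] at hke
          have hje : j = m.length := by simp at hk; omega
          subst hje
          simp only [Nat.sub_self, List.eraseIdx_cons_zero, List.append_nil] at hke
          exact Or.inr hke
  · rintro (h | h)
    · exact Or.inr ⟨0, by simp, by simpa using h⟩
    · refine Or.inr ⟨m.length + 1, by simp, ?_⟩
      rw [List.eraseIdx_cons_succ, List.eraseIdx_append_of_length_le le_rfl]
      simpa using h

-- the inclusive segment l[lo..hi] decomposed into first char, middle, last char
lemma seg_decomp (l : List Char) (lo hi : ℕ) (hlo : lo < hi) (hhi : hi < l.length) :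
    (l.drop lo).take (hi + 1 - lo)
      = l[lo] :: (((l.drop (lo + 1)).take (hi - 1 - lo)) ++ [l[hi]]) := by
  apply List.ext_getElem
  · simp; omega
  · intro k hk1 hk2
    have hk : k < hi + 1 - lo := by simp at hk1; omega
    rw [List.getElem_take, List.getElem_drop]
    rcases Nat.eq_zero_or_pos k with h0 | h0
    · subst h0; simp
    · obtain ⟨k', rfl⟩ : ∃ k', k = k' + 1 := ⟨k - 1, by omega⟩
      rw [List.getElem_cons_succ]
      rcases Nat.lt_or_ge k' (hi - 1 - lo) with hm | hm
      · rw [List.getElem_append_left (by simp; omega)]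
        rw [List.getElem_take, List.getElem_drop]
        congr 1; omega
      · rw [List.getElem_append_right (by simp; omega)]
        simp
        congr 1; omega

-- A's inner scan past i < j is true for hi ≤ lo, as is reverse-and-compare on a short segment
lemma isPal_base (l : List Char) (lo hi : ℕ) (h : hi ≤ lo) :
    pvIsPal l lo hi
      = ((l.drop lo).take (hi + 1 - lo) == ((l.drop lo).take (hi + 1 - lo)).reverse) := by
  rw [pvIsPal, dif_neg (by exact_mod_cast Nat.not_lt.mpr h)]
  exact (pal_short _ (by simp; omega)).symm

-- A's inner scan equals reverse-and-compare on the inclusive segment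
lemma isPal_eq_rev_aux (l : List Char) (n : ℕ) : ∀ lo hi : ℕ, hi - lo ≤ n → hi < l.length →
    pvIsPal l lo hi
      = ((l.drop lo).take (hi + 1 - lo) == ((l.drop lo).take (hi + 1 - lo)).reverse) := by
  induction n with
  | zero => intro lo hi hle _; exact isPal_base l lo hi (by omega)
  | succ n ih =>
    intro lo hi hle hhi
    by_cases hlt : lo < hi
    · have hIlt : (lo : Int) < (hi : Int) := by exact_mod_cast hlt
      rw [pvIsPal, dif_pos hIlt]
      have hlo' : lo < l.length := by omega
      have ha : PySem.List.pyGetD l (lo : Int) ' ' = l[lo] := by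
        simp [PySem.List.pyGetD_natCast, hlo']
      have hb : PySem.List.pyGetD l (hi : Int) ' ' = l[hi] := by
        simp [PySem.List.pyGetD_natCast, hhi]
      have e1 : (lo : Int) + 1 = ((lo + 1 : ℕ) : Int) := by omega
      have e2 : (hi : Int) - 1 = ((hi - 1 : ℕ) : Int) := by omega
      rw [ha, hb, e1, e2, ih (lo + 1) (hi - 1) (by omega) (by omega)]
      rw [seg_decomp l lo hi hlt hhi, pal_cons_append]
      have emid : hi - 1 + 1 - (lo + 1) = hi - 1 - lo := by omega
      rw [emid]
      by_cases hc : l[lo] = l[hi] <;> simp [hc]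
    · exact isPal_base l lo hi (by omega)

lemma isPal_eq_rev (l : List Char) (lo hi : ℕ) (hhi : hi < l.length) :
    pvIsPal l lo hi
      = ((l.drop lo).take (hi + 1 - lo) == ((l.drop lo).take (hi + 1 - lo)).reverse) :=
  isPal_eq_rev_aux l (hi - lo) lo hi le_rfl hhi

-- shifting an inclusive segment of a :: (m ++ [b]) one left lands in m
lemma seg_shift (a b : Char) (m : List Char) (lo hi : ℕ) (hlo : lo ≤ m.length)
    (hhi : hi < m.length) :
    ((a :: (m ++ [b])).drop (lo + 1)).take (hi + 1 + 1 - (lo + 1))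
      = (m.drop lo).take (hi + 1 - lo) := by
  rw [List.drop_succ_cons, List.drop_append_of_le_length hlo,
      show hi + 1 + 1 - (lo + 1) = hi + 1 - lo by omega,
      List.take_append_of_le_length (by simp; omega)]

-- A's inner scan is shift-invariant from a :: (m ++ [b]) to m
lemma isPal_shift (a b : Char) (m : List Char) (lo hi : ℕ) (hhi : hi < m.length) :
    pvIsPal (a :: (m ++ [b])) ((lo : Int) + 1) ((hi : Int) + 1) = pvIsPal m lo hi := by
  by_cases h : lo < hi
  · rw [show (lo : Int) + 1 = ((lo + 1 : ℕ) : Int) by push_cast; ring,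
        show (hi : Int) + 1 = ((hi + 1 : ℕ) : Int) by push_cast; ring,
        isPal_eq_rev _ (lo + 1) (hi + 1) (by simp; omega),
        isPal_eq_rev m lo hi hhi,
        seg_shift a b m lo hi (by omega) hhi]
  · rw [pvIsPal, dif_neg (by exact_mod_cast fun hc => h (by omega)),
        pvIsPal, dif_neg (by exact_mod_cast Nat.not_lt.mpr (by omega))]

-- A's outer loop is shift-invariant from a :: (m ++ [b]) to m
lemma loop_shift (a b : Char) (m : List Char) (n : ℕ) : ∀ i j : ℕ, j - i ≤ n → j < m.length →
    pvSolLoop (a :: (m ++ [b])) ((i : Int) + 1) ((j : Int) + 1) = pvSolLoop m i j := by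
  induction n with
  | zero =>
    intro i j hle hj
    rw [pvSolLoop, dif_neg (by omega),
        pvSolLoop, dif_neg (by exact_mod_cast Nat.not_lt.mpr (by omega))]
  | succ n ih =>
    intro i j hle hj
    by_cases hlt : i < j
    · have hIlt : ((i : Int) + 1) < ((j : Int) + 1) := by omega
      have hIlt' : (i : Int) < (j : Int) := by exact_mod_cast hlt
      rw [pvSolLoop, dif_pos hIlt]
      conv_rhs => rw [pvSolLoop]
      rw [dif_pos hIlt']
      have hi' : i < m.length := by omega
      have g1 : PySem.List.pyGetD (a :: (m ++ [b])) ((i : Int) + 1) ' ' = m[i] := by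
        rw [show (i : Int) + 1 = ((i + 1 : ℕ) : Int) by push_cast; ring,
            PySem.List.pyGetD_natCast, List.getD_eq_getElem _ _ (by simp; omega)]
        simp [List.getElem_append_left hi']
      have g2 : PySem.List.pyGetD (a :: (m ++ [b])) ((j : Int) + 1) ' ' = m[j] := by
        rw [show (j : Int) + 1 = ((j + 1 : ℕ) : Int) by push_cast; ring,
            PySem.List.pyGetD_natCast, List.getD_eq_getElem _ _ (by simp; omega)]
        simp [List.getElem_append_left hj]
      have g3 : PySem.List.pyGetD m (i : Int) ' ' = m[i] := by
        simp [PySem.List.pyGetD_natCast, hi']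
      have g4 : PySem.List.pyGetD m (j : Int) ' ' = m[j] := by
        simp [PySem.List.pyGetD_natCast, hj]
      rw [g1, g2, g3, g4]
      by_cases hc : m[i] = m[j]
      · simp only [hc, beq_self_eq_true, if_true]
        rw [show (i : Int) + 1 + 1 = ((i + 1 : ℕ) : Int) + 1 by push_cast; ring,
            show (j : Int) + 1 - 1 = ((j - 1 : ℕ) : Int) + 1 by omega]
        rw [ih (i + 1) (j - 1) (by omega) (by omega),
            show ((i + 1 : ℕ) : Int) = (i : Int) + 1 by push_cast; ring,
            show ((j - 1 : ℕ) : Int) = (j : Int) - 1 by omega]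
      · have hcb : (m[i] == m[j]) = false := by simp [hc]
        simp only [hcb, Bool.false_eq_true, if_false]
        rw [show (i : Int) + 1 + 1 = ((i + 1 : ℕ) : Int) + 1 by push_cast; ring,
            show (j : Int) + 1 - 1 = ((j - 1 : ℕ) : Int) + 1 by omega]
        rw [isPal_shift a b m (i + 1) j hj, isPal_shift a b m i (j - 1) (by omega),
            show ((i + 1 : ℕ) : Int) = (i : Int) + 1 by push_cast; ring,
            show ((j - 1 : ℕ) : Int) = (j : Int) - 1 by omega]
    · rw [pvSolLoop, dif_neg (by omega),
          pvSolLoop, dif_neg (by exact_mod_cast Nat.not_lt.mpr (by omega))]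

-- A's outer loop from the full span decides pvD1
lemma loop_iff_D1 : ∀ n (l : List Char), l.length = n →
    (pvSolLoop l 0 ((l.length : Int) - 1) = true ↔ pvD1 l) := by
  intro n
  induction n using Nat.strong_induction_on with
  | _ n ih =>
    intro l hl
    match l with
    | [] =>
      rw [pvSolLoop, dif_neg (by norm_num)]
      simp [pvD1]
    | [a] =>
      rw [pvSolLoop, dif_neg (by norm_num)]
      simp [pvD1]
    | a :: c :: t =>
      obtain ⟨m, b, he⟩ : ∃ m b, c :: t = m ++ [b] := by
        rcases List.eq_nil_or_concat (c :: t) with h0 | ⟨m, b, h0⟩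
        · simp at h0
        · exact ⟨m, b, by simpa using h0⟩
      rw [he]
      have hlen : (((a :: (m ++ [b])).length : ℕ) : Int) - 1 = (m.length : Int) + 1 := by
        simp
      rw [hlen, pvSolLoop, dif_pos (by omega)]
      have g1 : PySem.List.pyGetD (a :: (m ++ [b])) 0 ' ' = a := PySem.List.pyGetD_zero_cons _ _ _
      have g2 : PySem.List.pyGetD (a :: (m ++ [b])) ((m.length : Int) + 1) ' ' = b := by
        rw [show (m.length : Int) + 1 = ((m.length + 1 : ℕ) : Int) by push_cast; ring,
            PySem.List.pyGetD_natCast, List.getD_eq_getElem _ _ (by simp)]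
        simp
      rw [g1, g2]
      by_cases hc : a = b
      · subst hc
        simp only [beq_self_eq_true, if_true]
        rcases eq_or_ne m [] with rfl | hm
        · rw [show ((List.nil (α := Char)).length : Int) + 1 - 1 = 0 by simp,
              pvSolLoop, dif_neg (by norm_num)]
          simp [pvD1]
        · have hM : 1 ≤ m.length := by
            cases m with | nil => exact absurd rfl hm | cons _ _ => simp
          rw [show (0 : Int) + 1 = ((0 : ℕ) : Int) + 1 by norm_num,
              show (m.length : Int) + 1 - 1 = ((m.length - 1 : ℕ) : Int) + 1 by omega,
              loop_shift a a m m.length 0 (m.length - 1) (by omega) (by omega),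
              show ((0 : ℕ) : Int) = (0 : Int) by norm_num,
              show ((m.length - 1 : ℕ) : Int) = (m.length : Int) - 1 by omega]
          have hmn : m.length < n := by
            have h' := congrArg List.length he
            simp at h'
            simp at hl
            omega
          exact (ih m.length hmn m rfl).trans (pvD1_peel_eq a m).symm
      · have hcb : (a == b) = false := by simp [hc]
        simp only [hcb, Bool.false_eq_true, if_false]
        have p1 : pvIsPal (a :: (m ++ [b])) (0 + 1) ((m.length : Int) + 1)
            = ((m ++ [b]) == (m ++ [b]).reverse) := by
          rw [show (0 : Int) + 1 = ((1 : ℕ) : Int) by norm_num,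
              show (m.length : Int) + 1 = ((m.length + 1 : ℕ) : Int) by push_cast; ring,
              isPal_eq_rev _ 1 (m.length + 1) (by simp)]
          congr 2 <;>
            simp [List.take_of_length_le, show m.length + 1 + 1 - 1 = m.length + 1 by omega]
        have p2 : pvIsPal (a :: (m ++ [b])) 0 ((m.length : Int) + 1 - 1)
            = ((a :: m) == (a :: m).reverse) := by
          rw [show (0 : Int) = ((0 : ℕ) : Int) by norm_num,
              show (m.length : Int) + 1 - 1 = ((m.length : ℕ) : Int) by omega,
              isPal_eq_rev _ 0 m.length (by simp)]
          congr 2 <;> simp [List.take_append_of_le_length (le_refl m.length)]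
        rw [p1, p2, pvD1_peel_ne a b m hc]
        constructor
        · intro h
          rcases Bool.or_eq_true_iff.mp h with h1 | h1
          · exact Or.inl (beq_iff_eq.mp h1).symm
          · exact Or.inr (beq_iff_eq.mp h1).symm
        · rintro (h1 | h1)
          · exact Bool.or_eq_true_iff.mpr (Or.inl (beq_iff_eq.mpr h1.symm))
          · exact Bool.or_eq_true_iff.mpr (Or.inr (beq_iff_eq.mpr h1.symm))

-- B decides pvD1
lemma alt_iff_D1 (s : String) : solution_alt s = true ↔ pvD1 s.toList := by
  unfold solution_alt
  by_cases hp : s.toList.reverse = s.toList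
  · rw [if_pos (beq_iff_eq.mpr hp.symm)]
    simp [pvD1, hp]
  · rw [if_neg (by simpa using fun h => hp h.symm)]
    rw [List.any_eq_true]
    constructor
    · rintro ⟨x, hx, hfx⟩
      rw [PySem.List.mem_pyRange_one] at hx
      obtain ⟨k, rfl⟩ : ∃ k : ℕ, x = (k : Int) := ⟨x.toNat, by omega⟩
      have hk : k < s.toList.length := by exact_mod_cast hx.2
      refine Or.inr ⟨k, hk, ?_⟩
      rw [PySem.List.slice_to_natCast,
          show ((k : Int) + 1) = ((k + 1 : ℕ) : Int) by push_cast; ring,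
          PySem.List.slice_from_natCast, ← List.eraseIdx_eq_take_drop_succ] at hfx
      exact (beq_iff_eq.mp hfx).symm
    · rintro (h | ⟨k, hk, hke⟩)
      · exact absurd h hp
      · refine ⟨(k : Int), PySem.List.mem_pyRange_one.mpr ⟨by omega, by exact_mod_cast hk⟩, ?_⟩
        rw [PySem.List.slice_to_natCast,
            show ((k : Int) + 1) = ((k + 1 : ℕ) : Int) by push_cast; ring,
            PySem.List.slice_from_natCast, ← List.eraseIdx_eq_take_drop_succ]
        exact beq_iff_eq.mpr hke.symm

-- pvD1 always holds on one- and two-character strings (A's special-cased guards)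
lemma pvD1_short (l : List Char) (h : l.length ≤ 2) : pvD1 l := by
  match l, h with
  | [], _ => exact Or.inl rfl
  | [a], _ => exact Or.inl rfl
  | [a, b], _ =>
    rcases eq_or_ne a b with rfl | hab
    · exact Or.inl rfl
    · exact Or.inr ⟨0, by simp, rfl⟩

-- ===== VERDICT (by name: the statement is the Claim_ definition above) =====
theorem solution_spec : Claim_equal_solution := by
  intro s _
  show solution s = solution_alt s
  rw [Bool.eq_iff_iff, alt_iff_D1]
  unfold solution
  by_cases h1 : s.toList.length = 1
  · simp only [h1]
    norm_num
    exact pvD1_short _ (by omega)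
  · by_cases h2 : s.toList.length = 2
    · simp only [h2]
      norm_num
      exact pvD1_short _ (by omega)
    · have e1 : (s.toList.length == 1) = false := by simpa using h1
      have e2 : (s.toList.length == 2) = false := by simpa using h2
      simp only [e1, e2, Bool.false_eq_true, if_false]
      exact loop_iff_D1 s.toList.length s.toList rfl
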